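-- pv_equiv track=rewrite | github.com/JhonnyCamilo/bash | test2.py | simon_encrypt
-- ===== SOURCE A (Python) =====
-- def rotr(x, k, bits=16):
--     """Rotación a la derecha de x por k bits en un bloque de tamaño bits"""
--     return (x >> k) | ((x << (bits - k)) & ((1 << bits) - 1))
--
-- def rotl(x, k, bits=16):
--     """Rotación a la izquierda de x por k bits en un bloque de tamaño bits"""
--     return ((x << k) & ((1 << bits) - 1)) | (x >> (bits - k))
--
-- def simon_round(L, R, K):
--     """Realiza una ronda del cifrado Simon"""
--     S1 = rotl(R, 1)
--     S8 = rotl(R, 8)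
--     S2 = rotl(R, 2)
--
--     # Aplicación del AND entre S1 y S8 y luego XOR con S2
--     F = (S1 & S8) ^ S2
--
--     # Nueva parte izquierda y derecha
--     new_L = R
--     new_R = L ^ F ^ K
--
--     return new_L, new_R
--
-- def key_schedule(key, rounds=32):
--     """Generación de subclaves para las rondas"""
--     subkeys = [0] * rounds
--     subkeys[0] = key & 0xffff
--     subkeys[1] = (key >> 16) & 0xffff
--     subkeys[2] = (key >> 32) & 0xffff
--     subkeys[3] = (key >> 48) & 0xffff
--
--     # Valor inicial de c
--     c = 0xfffd
--
--     for i in range(4, rounds):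
--         temp = rotr(subkeys[i - 1], 3)
--         temp1 = temp ^ subkeys[i - 3]
--         temp2 = rotr(temp1, 1)
--         temp3 = temp1 ^ subkeys[i - 4]
--         temp4 = temp3 ^ temp2
--
--         # Alternar c según las reglas dadas
--         if i == 9:
--             c = 0xfffc
--         elif i == 10:
--             c = 0xfffd
--         elif i == 11:
--             c = 0xfffc
--         elif i == 14:
--             c = 0xfffd
--         elif i == 15:
--             c = 0xfffc
--         elif i == 17:
--             c = 0xfffd
--         elif i == 18:
--             c = 0xfffc
--         elif i == 19:
--             c = 0xfffd
--         elif i == 20: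
--             c = 0xfffc
--         elif i == 21:
--             c = 0xfffd
--         elif i == 23:
--             c = 0xfffc
--         elif i == 27:
--             c = 0xfffd
--         elif i == 30:
--             c = 0xfffc
--
--         subkeys[i] = temp4 ^ c
--
--     return subkeys
--
-- def simon_encrypt(plaintext, key, rounds=32):
--     """Cifra el texto plano usando el cifrado Simon"""
--     # Dividir el texto plano en dos partes de 16 bits
--     L = (plaintext >> 16) & 0xffff
--     R = plaintext & 0xffff
--
--     # Generar las subclaves según el esquema dado
--     subkeys = key_schedule(key, rounds)
--
--     # Ejecutar las rondas de cifrado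
--     for i in range(rounds):
--         L, R = simon_round(L, R, subkeys[i])
--
--     # Recombinar las dos partes
--     ciphertext = (L << 16) | R
--     return ciphertext
-- ===== SOURCE B (Python) =====
-- # Fused key-schedule + encryption: one pass with a 4-word sliding key window
-- # and the round-constant sequence given in closed form, no subkeys list.
--
-- _FFFD = frozenset({4, 5, 6, 7, 8, 10, 14, 17, 19, 21, 22, 27, 28, 29})
--
--
-- def _ror16(x, k):
--     return ((x >> k) | (x << (16 - k))) & 0xffff
--
--
-- def _rol16(x, k):
--     return ((x << k) | (x >> (16 - k))) & 0xffff
--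
--
-- def simon_encrypt(plaintext, key, rounds=32):
--     L = (plaintext >> 16) & 0xffff
--     R = plaintext & 0xffff
--     w0 = key & 0xffff
--     w1 = (key >> 16) & 0xffff
--     w2 = (key >> 32) & 0xffff
--     w3 = (key >> 48) & 0xffff
--     for i in range(rounds):
--         if i == 0:
--             k = w0
--         elif i == 1:
--             k = w1
--         elif i == 2:
--             k = w2
--         elif i == 3:
--             k = w3
--         else:
--             t = _ror16(w3, 3) ^ w1
--             k = t ^ w0 ^ _ror16(t, 1) ^ (0xfffd if i in _FFFD else 0xfffc)
--             w0, w1, w2, w3 = w1, w2, w3, k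
--         L, R = R, L ^ ((_rol16(R, 1) & _rol16(R, 8)) ^ _rol16(R, 2)) ^ k
--     return (L << 16) | R
-- ===== Notes on version B (the rewrite author's own statement) =====
-- stated objective: alternative
-- what changed: B fuses the key schedule and the encryption rounds into a single loop over a 4-word sliding key window, replacing A's precomputed subkeys list and its sticky if/elif c-state with a closed-form per-round constant (membership in a fixed index set), so no subkeys array is ever built.
import Mathlib
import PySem

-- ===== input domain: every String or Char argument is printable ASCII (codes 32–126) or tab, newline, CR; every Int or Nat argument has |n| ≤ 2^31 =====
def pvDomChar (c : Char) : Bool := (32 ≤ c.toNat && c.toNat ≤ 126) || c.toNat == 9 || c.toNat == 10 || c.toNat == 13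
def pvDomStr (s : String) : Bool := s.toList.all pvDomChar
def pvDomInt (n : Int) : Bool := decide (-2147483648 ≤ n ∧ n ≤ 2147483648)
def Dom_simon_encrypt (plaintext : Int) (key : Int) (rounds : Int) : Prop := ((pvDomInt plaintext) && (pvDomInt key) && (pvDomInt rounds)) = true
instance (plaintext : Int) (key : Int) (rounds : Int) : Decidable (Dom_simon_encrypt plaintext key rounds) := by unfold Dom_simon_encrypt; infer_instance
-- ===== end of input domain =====

-- B fuses the key schedule and the rounds into one pass over a 4-word sliding key window,
-- with the derived round-constant sequence given in closed form (no subkeys list).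

-- ===== PORT A =====
def pvRotr (x : Int) (k : Nat) : Int :=
  PySem.Int.bor (x >>> k) (PySem.Int.band (x <<< (16 - k)) 0xffff)

def pvRotl (x : Int) (k : Nat) : Int :=
  PySem.Int.bor (PySem.Int.band (x <<< k) 0xffff) (x >>> (16 - k))

def pvSimonRound (L R K : Int) : Int × Int :=
  let S1 := pvRotl R 1
  let S8 := pvRotl R 8
  let S2 := pvRotl R 2
  let F := PySem.Int.bxor (PySem.Int.band S1 S8) S2
  (R, PySem.Int.bxor (PySem.Int.bxor L F) K)

-- the sticky if/elif chain updating c (inlined in A's loop body)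
def pvUpdC (c : Int) (i : Int) : Int :=
  if i = 9 then 0xfffc else if i = 10 then 0xfffd else if i = 11 then 0xfffc
  else if i = 14 then 0xfffd else if i = 15 then 0xfffc else if i = 17 then 0xfffd
  else if i = 18 then 0xfffc else if i = 19 then 0xfffd else if i = 20 then 0xfffc
  else if i = 21 then 0xfffd else if i = 23 then 0xfffc else if i = 27 then 0xfffd
  else if i = 30 then 0xfffc else c

-- one iteration of A's key-schedule loop. Python's list is O(1)-indexed, so subkeys is
-- ported as an Array; under Pre_ (4 ≤ rounds) every subkeys[…] read/write is in range and
-- every loop index i is ≥ 4, so .toNat and the totalised getD/setIfInBounds are exact there.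
def pvKsStep (st : Array Int × Int) (i : Int) : Array Int × Int :=
  let subkeys := st.1
  let temp := pvRotr (subkeys.getD (i - 1).toNat 0) 3
  let temp1 := PySem.Int.bxor temp (subkeys.getD (i - 3).toNat 0)
  let temp2 := pvRotr temp1 1
  let temp3 := PySem.Int.bxor temp1 (subkeys.getD (i - 4).toNat 0)
  let temp4 := PySem.Int.bxor temp3 temp2
  let c := pvUpdC st.2 i
  (subkeys.setIfInBounds i.toNat (PySem.Int.bxor temp4 c), c)

def pvKeySchedule (key : Int) (rounds : Int) : Array Int :=
  let subkeys := Array.replicate rounds.toNat (0 : Int)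
  let subkeys := subkeys.setIfInBounds 0 (PySem.Int.band key 0xffff)
  let subkeys := subkeys.setIfInBounds 1 (PySem.Int.band (key >>> 16) 0xffff)
  let subkeys := subkeys.setIfInBounds 2 (PySem.Int.band (key >>> 32) 0xffff)
  let subkeys := subkeys.setIfInBounds 3 (PySem.Int.band (key >>> 48) 0xffff)
  ((PySem.List.pyRange 4 rounds 1).foldl pvKsStep (subkeys, 0xfffd)).1

def simon_encrypt (plaintext : Int) (key : Int) (rounds : Int) : Int :=
  let L := PySem.Int.band (plaintext >>> 16) 0xffff
  let R := PySem.Int.band plaintext 0xffff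
  let subkeys := pvKeySchedule key rounds
  let p := (PySem.List.pyRange 0 rounds 1).foldl
    (fun (p : Int × Int) (i : Int) =>
      pvSimonRound p.1 p.2 (subkeys.getD i.toNat 0)) (L, R)
  PySem.Int.bor (p.1 <<< 16) p.2

-- ===== PORT B =====
def pvRor16 (x : Int) (k : Nat) : Int :=
  PySem.Int.band (PySem.Int.bor (x >>> k) (x <<< (16 - k))) 0xffff

def pvRol16 (x : Int) (k : Nat) : Int :=
  PySem.Int.band (PySem.Int.bor (x <<< k) (x >>> (16 - k))) 0xffff

-- rounds whose derived constant is 0xfffd (all others use 0xfffc)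
def pvFFFD : List Int := [4, 5, 6, 7, 8, 10, 14, 17, 19, 21, 22, 27, 28, 29]

def pvFuseStep (s : Int × Int × Int × Int × Int × Int) (i : Int) :
    Int × Int × Int × Int × Int × Int :=
  let L := s.1
  let R := s.2.1
  let w0 := s.2.2.1
  let w1 := s.2.2.2.1
  let w2 := s.2.2.2.2.1
  let w3 := s.2.2.2.2.2
  let kw : Int × Int × Int × Int × Int :=
    if i = 0 then (w0, w0, w1, w2, w3)
    else if i = 1 then (w1, w0, w1, w2, w3)
    else if i = 2 then (w2, w0, w1, w2, w3)
    else if i = 3 then (w3, w0, w1, w2, w3)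
    else
      let t := PySem.Int.bxor (pvRor16 w3 3) w1
      let k := PySem.Int.bxor (PySem.Int.bxor (PySem.Int.bxor t w0) (pvRor16 t 1))
        (if i ∈ pvFFFD then (0xfffd : Int) else 0xfffc)
      (k, w1, w2, w3, k)
  (R,
   PySem.Int.bxor
     (PySem.Int.bxor L
       (PySem.Int.bxor (PySem.Int.band (pvRol16 R 1) (pvRol16 R 8)) (pvRol16 R 2)))
     kw.1,
   kw.2.1, kw.2.2.1, kw.2.2.2.1, kw.2.2.2.2)

def simon_encrypt_alt (plaintext : Int) (key : Int) (rounds : Int) : Int :=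
  let s := (PySem.List.pyRange 0 rounds 1).foldl pvFuseStep
    (PySem.Int.band (plaintext >>> 16) 0xffff,
     PySem.Int.band plaintext 0xffff,
     PySem.Int.band key 0xffff,
     PySem.Int.band (key >>> 16) 0xffff,
     PySem.Int.band (key >>> 32) 0xffff,
     PySem.Int.band (key >>> 48) 0xffff)
  PySem.Int.bor (s.1 <<< 16) s.2.1

-- ===== PRECONDITION & SPEC =====
-- A's key_schedule always assigns subkeys[0..3] into a list of length rounds, so
-- A raises IndexError for rounds < 4; Pre_ excludes exactly those inputs.
def Pre_simon_encrypt (plaintext : Int) (key : Int) (rounds : Int) : Prop := 4 ≤ rounds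
instance (plaintext : Int) (key : Int) (rounds : Int) : Decidable (Pre_simon_encrypt plaintext key rounds) := by unfold Pre_simon_encrypt; infer_instance

def pvWitness_simon_encrypt : Int × Int × Int := (5, 9, 4)

def Spec_simon_encrypt (plaintext : Int) (key : Int) (rounds : Int) (out : Int) : Prop := out = simon_encrypt_alt plaintext key rounds
instance (plaintext : Int) (key : Int) (rounds : Int) (out : Int) : Decidable (Spec_simon_encrypt plaintext key rounds out) := by unfold Spec_simon_encrypt; infer_instance

-- ===== CLAIM (what is proved, stated in full; the proofs are below) =====
def Claim_equal_simon_encrypt : Prop := ∀ (plaintext : Int) (key : Int) (rounds : Int), Dom_simon_encrypt plaintext key rounds → Pre_simon_encrypt plaintext key rounds → Spec_simon_encrypt plaintext key rounds (simon_encrypt plaintext key rounds)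

-- ===== LEMMAS AND PROOFS =====

-- the derived round constant used at round i (closed form of A's sticky c)
def pvCfi (j : Nat) : Int := if (j : Int) ∈ pvFFFD then 0xfffd else 0xfffc

-- the subkey sequence A's schedule produces
def pvSkf (key : Int) : Nat → Int
  | 0 => PySem.Int.band key 0xffff
  | 1 => PySem.Int.band (key >>> 16) 0xffff
  | 2 => PySem.Int.band (key >>> 32) 0xffff
  | 3 => PySem.Int.band (key >>> 48) 0xffff
  | (n + 4) =>
    let t := PySem.Int.bxor (pvRotr (pvSkf key (n + 3)) 3) (pvSkf key (n + 1))
    PySem.Int.bxor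
      (PySem.Int.bxor (PySem.Int.bxor t (pvSkf key n)) (pvRotr t 1))
      (pvCfi (n + 4))

-- the subkeys list after the first m entries have been filled (positions ≥ m still 0)
def pvLm (key : Int) (n m : Nat) : List Int :=
  (List.range n).map (fun j => if j < m then pvSkf key j else 0)

def pvLmA (key : Int) (n m : Nat) : Array Int := (pvLm key n m).toArray

-- A's c state after the schedule loop has processed indices 4..m-1
def pvCpost (m : Nat) : Int := if m ≤ 4 then 0xfffd else pvCfi (m - 1)

-- B's key window after m fused rounds
def pvWnd (key : Int) (m : Nat) : Int × Int × Int × Int :=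
  if m ≤ 4 then (pvSkf key 0, pvSkf key 1, pvSkf key 2, pvSkf key 3)
  else (pvSkf key (m - 4), pvSkf key (m - 3), pvSkf key (m - 2), pvSkf key (m - 1))

lemma pv_repr {x : Int} (hx : 0 ≤ x) (hx2 : x < 65536) :
    ∃ m : Nat, x = (m : Int) ∧ m < 65536 := ⟨x.toNat, by omega, by omega⟩

lemma nat_and_mask_of_lt {m : Nat} (h : m < 65536) : m &&& 65535 = m := by
  have := Nat.and_two_pow_sub_one_eq_mod m 16
  norm_num at this
  rw [this, Nat.mod_eq_of_lt h]

lemma pv_rotr_eq_cast (m k : Nat) :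
    pvRotr (m : Int) k = ((m >>> k ||| (m <<< (16 - k)) &&& 65535 : Nat) : Int) := by
  unfold pvRotr
  rw [← Int.natCast_shiftRight, ← Int.natCast_shiftLeft]
  have e : (0xffff : Int) = ((65535 : Nat) : Int) := by norm_num
  rw [e, PySem.Int.band_natCast, PySem.Int.bor_natCast]

lemma pv_rotl_eq_cast (m k : Nat) :
    pvRotl (m : Int) k = (((m <<< k) &&& 65535 ||| m >>> (16 - k) : Nat) : Int) := by
  unfold pvRotl
  rw [← Int.natCast_shiftRight, ← Int.natCast_shiftLeft]
  have e : (0xffff : Int) = ((65535 : Nat) : Int) := by norm_num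
  rw [e, PySem.Int.band_natCast, PySem.Int.bor_natCast]

lemma pv_mask_bounds (a : Int) :
    0 ≤ PySem.Int.band a 0xffff ∧ PySem.Int.band a 0xffff < 65536 := by
  unfold PySem.Int.band
  split_ifs with h1 h2 h2
  · have h := Nat.and_two_pow_sub_one_eq_mod a.toNat 16
    norm_num at h
    have e : (0xffff:Int).toNat = 65535 := rfl
    rw [e, h]
    have := Nat.mod_lt a.toNat (y := 65536) (by norm_num)
    omega
  · norm_num at h2
  · have e : (0xffff:Int).toNat = 65535 := rfl
    rw [e]
    have : 65535 - (65535 &&& (-a-1).toNat) ≤ 65535 := by omega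
    omega
  · norm_num at h2


lemma pv_band_bounds {a b : Int} (ha : 0 ≤ a) (ha2 : a < 65536) (hb : 0 ≤ b) :
    0 ≤ PySem.Int.band a b ∧ PySem.Int.band a b < 65536 := by
  rw [PySem.Int.band_of_nonneg ha hb]
  have := Nat.and_le_left (n := a.toNat) (m := b.toNat)
  omega


lemma pv_bxor_bounds {a b : Int} (ha : 0 ≤ a) (ha2 : a < 65536) (hb : 0 ≤ b) (hb2 : b < 65536) :
    0 ≤ PySem.Int.bxor a b ∧ PySem.Int.bxor a b < 65536 := by
  rw [PySem.Int.bxor_of_nonneg ha hb]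
  have : a.toNat ^^^ b.toNat < 2 ^ 16 :=
    Nat.xor_lt_two_pow (by omega) (by omega)
  norm_num at this
  omega


lemma pv_rotr_bounds {x : Int} (hx : 0 ≤ x) (hx2 : x < 65536) (k : Nat) :
    0 ≤ pvRotr x k ∧ pvRotr x k < 65536 := by
  obtain ⟨m, rfl, hm⟩ := pv_repr hx hx2
  rw [pv_rotr_eq_cast]
  have h1 : m >>> k < 2 ^ 16 := lt_of_le_of_lt (Nat.shiftRight_le m k) (by norm_num; omega)
  have h2 : (m <<< (16 - k)) &&& 65535 < 2 ^ 16 :=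
    lt_of_le_of_lt (Nat.and_le_right) (by norm_num)
  have := Nat.or_lt_two_pow h1 h2
  norm_num at this
  omega


lemma pv_rotl_bounds {x : Int} (hx : 0 ≤ x) (hx2 : x < 65536) (k : Nat) :
    0 ≤ pvRotl x k ∧ pvRotl x k < 65536 := by
  obtain ⟨m, rfl, hm⟩ := pv_repr hx hx2
  rw [pv_rotl_eq_cast]
  have h1 : m >>> (16 - k) < 2 ^ 16 := lt_of_le_of_lt (Nat.shiftRight_le m _) (by norm_num; omega)
  have h2 : (m <<< k) &&& 65535 < 2 ^ 16 :=
    lt_of_le_of_lt (Nat.and_le_right) (by norm_num)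
  have := Nat.or_lt_two_pow h2 h1
  norm_num at this
  omega


lemma pv_ror_eq {x : Int} (hx : 0 ≤ x) (hx2 : x < 65536) (k : Nat) :
    pvRor16 x k = pvRotr x k := by
  obtain ⟨m, rfl, hm⟩ := pv_repr hx hx2
  rw [pv_rotr_eq_cast]
  unfold pvRor16
  rw [← Int.natCast_shiftRight, ← Int.natCast_shiftLeft]
  have e : (0xffff : Int) = ((65535 : Nat) : Int) := by norm_num
  rw [e, PySem.Int.bor_natCast, PySem.Int.band_natCast]
  congr 1
  rw [Nat.and_or_distrib_right,
      nat_and_mask_of_lt (lt_of_le_of_lt (Nat.shiftRight_le m k) hm)]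


lemma pv_rol_eq {x : Int} (hx : 0 ≤ x) (hx2 : x < 65536) (k : Nat) :
    pvRol16 x k = pvRotl x k := by
  obtain ⟨m, rfl, hm⟩ := pv_repr hx hx2
  rw [pv_rotl_eq_cast]
  unfold pvRol16
  rw [← Int.natCast_shiftRight, ← Int.natCast_shiftLeft]
  have e : (0xffff : Int) = ((65535 : Nat) : Int) := by norm_num
  rw [e, PySem.Int.bor_natCast, PySem.Int.band_natCast]
  congr 1
  rw [Nat.and_or_distrib_right,
      nat_and_mask_of_lt (lt_of_le_of_lt (Nat.shiftRight_le m _) hm)]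


lemma pv_cfi_bounds (j : Nat) : 0 ≤ pvCfi j ∧ pvCfi j < 65536 := by
  unfold pvCfi
  split_ifs <;> norm_num

lemma pv_skf_bounds (key : Int) (j : Nat) : 0 ≤ pvSkf key j ∧ pvSkf key j < 65536 := by
  induction j using Nat.strong_induction_on with
  | _ j ih =>
    match j with
    | 0 => exact pv_mask_bounds key
    | 1 => exact pv_mask_bounds _
    | 2 => exact pv_mask_bounds _
    | 3 => exact pv_mask_bounds _
    | n + 4 =>
      have h3 := ih (n + 3) (by omega)
      have h1 := ih (n + 1) (by omega)
      have h0 := ih n (by omega)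
      have hr := pv_rotr_bounds h3.1 h3.2 3
      have ht := pv_bxor_bounds hr.1 hr.2 h1.1 h1.2
      have ht0 := pv_bxor_bounds ht.1 ht.2 h0.1 h0.2
      have hr1 := pv_rotr_bounds ht.1 ht.2 1
      have h4 := pv_bxor_bounds ht0.1 ht0.2 hr1.1 hr1.2
      have hc := pv_cfi_bounds (n + 4)
      have := pv_bxor_bounds h4.1 h4.2 hc.1 hc.2
      simpa [pvSkf] using this

lemma pv_skf_eq (key : Int) (m : Nat) (hm : 4 ≤ m) :
    pvSkf key m =
      PySem.Int.bxor (PySem.Int.bxor (PySem.Int.bxor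
        (PySem.Int.bxor (pvRotr (pvSkf key (m - 1)) 3) (pvSkf key (m - 3)))
        (pvSkf key (m - 4)))
        (pvRotr (PySem.Int.bxor (pvRotr (pvSkf key (m - 1)) 3) (pvSkf key (m - 3))) 1))
        (pvCfi m) := by
  obtain ⟨n, rfl⟩ : ∃ n, m = n + 4 := ⟨m - 4, by omega⟩
  have e1 : n + 4 - 1 = n + 3 := by omega
  have e3 : n + 4 - 3 = n + 1 := by omega
  have e4 : n + 4 - 4 = n := by omega
  rw [e1, e3, e4]
  simp [pvSkf]

lemma pv_updc (m : Nat) (hm : 4 ≤ m) : pvUpdC (pvCpost m) (m : Int) = pvCfi m := by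
  by_cases h : m ≤ 31
  · interval_cases m <;> rfl
  · have h1 : pvUpdC (pvCpost m) (m : Int) = pvCpost m := by
      unfold pvUpdC
      rw [if_neg (by omega), if_neg (by omega), if_neg (by omega), if_neg (by omega),
          if_neg (by omega), if_neg (by omega), if_neg (by omega), if_neg (by omega),
          if_neg (by omega), if_neg (by omega), if_neg (by omega), if_neg (by omega),
          if_neg (by omega)]
    rw [h1]
    unfold pvCpost pvCfi pvFFFD
    rw [if_neg (by omega)]
    rw [if_neg (by simp; omega), if_neg (by simp; omega)]

lemma pv_lm_get (key : Int) (n m j : Nat) (hj : j < n) (hjm : j < m) :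
    (pvLmA key n m).getD j 0 = pvSkf key j := by
  unfold pvLmA pvLm
  have hs : j < ((List.range n).map
      (fun j => if j < m then pvSkf key j else 0)).toArray.size := by
    simpa using hj
  rw [Array.getD, dif_pos hs]
  have e : ((List.range n).map
      (fun j => if j < m then pvSkf key j else 0)).toArray.getInternal j hs
      = ((List.range n).map (fun j => if j < m then pvSkf key j else 0))[j]'(by
          simpa using hj) := rfl
  rw [e]
  simp [hjm]

lemma pv_lm_set (key : Int) (n m : Nat) (hm : m < n) :
    (pvLm key n m).set m (pvSkf key m) = pvLm key n (m + 1) := by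
  apply List.ext_getElem
  · simp [pvLm]
  · intro i h1 h2
    simp only [pvLm, List.getElem_set, List.getElem_map, List.getElem_range] at *
    by_cases hi : i = m
    · subst hi; simp
    · rw [if_neg (fun he => hi he.symm)]
      have : (i < m) = (i < m + 1) := by
        apply propext; constructor <;> intro <;> omega
      simp [this]

lemma pv_lm_setA (key : Int) (n m : Nat) (hm : m < n) :
    (pvLmA key n m).setIfInBounds m (pvSkf key m) = pvLmA key n (m + 1) := by
  unfold pvLmA
  rw [List.setIfInBounds_toArray, pv_lm_set key n m hm]

lemma pv_wnd_ge (key : Int) (m : Nat) (hm : 4 ≤ m) :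
    pvWnd key m = (pvSkf key (m - 4), pvSkf key (m - 3), pvSkf key (m - 2), pvSkf key (m - 1)) := by
  unfold pvWnd
  split_ifs with h
  · have : m = 4 := by omega
    subst this
    norm_num
  · rfl

lemma pv_init (key : Int) (n : Nat) (hn : 4 ≤ n) :
    ((((Array.replicate n (0 : Int)).setIfInBounds
      0 (PySem.Int.band key 0xffff)).setIfInBounds
      1 (PySem.Int.band (key >>> 16) 0xffff)).setIfInBounds
      2 (PySem.Int.band (key >>> 32) 0xffff)).setIfInBounds
      3 (PySem.Int.band (key >>> 48) 0xffff) = pvLmA key n 4 := by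
  rw [Array.replicate_eq_toArray_replicate, List.setIfInBounds_toArray,
      List.setIfInBounds_toArray, List.setIfInBounds_toArray, List.setIfInBounds_toArray]
  unfold pvLmA
  congr 1
  apply List.ext_getElem
  · simp [pvLm]
  · intro i h1 h2
    simp only [List.getElem_set, List.getElem_replicate, pvLm, List.getElem_map,
      List.getElem_range]
    have hlen : i < n := by simpa [pvLm] using h2
    by_cases i3 : i = 3
    · subst i3; rfl
    · rw [if_neg (fun he => i3 he.symm)]
      by_cases i2 : i = 2
      · subst i2; rfl
      · rw [if_neg (fun he => i2 he.symm)]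
        by_cases i1 : i = 1
        · subst i1; rfl
        · rw [if_neg (fun he => i1 he.symm)]
          by_cases i0 : i = 0
          · subst i0; rfl
          · rw [if_neg (fun he => i0 he.symm), if_neg (by omega)]

lemma pv_fold_sched (key : Int) (n : Nat) (hn : 4 ≤ n) (m : Nat) (h4 : 4 ≤ m) (hmn : m ≤ n) :
    (PySem.List.pyRange 4 (m : Int) 1).foldl pvKsStep (pvLmA key n 4, 0xfffd)
      = (pvLmA key n m, pvCpost m) := by
  induction m, h4 using Nat.le_induction with
  | base =>
    rw [show ((4:Nat):Int) = 4 by norm_num, PySem.List.pyRange_one_eq_nil (by norm_num)]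
    rfl
  | succ m hm ih =>
    have hmn' : m ≤ n := by omega
    rw [show ((m+1:Nat):Int) = (m:Int)+1 by push_cast; ring,
        PySem.List.pyRange_one_succ_right (by exact_mod_cast hm),
        List.foldl_append, ih hmn']
    show pvKsStep (pvLmA key n m, pvCpost m) (m : Int) = _
    simp only [pvKsStep]
    have e1 : ((m : Int) - 1).toNat = m - 1 := by omega
    have e3 : ((m : Int) - 3).toNat = m - 3 := by omega
    have e4 : ((m : Int) - 4).toNat = m - 4 := by omega
    have e0 : ((m : Int)).toNat = m := by omega
    rw [e1, e3, e4, e0,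
        pv_lm_get key n m (m - 1) (by omega) (by omega),
        pv_lm_get key n m (m - 3) (by omega) (by omega),
        pv_lm_get key n m (m - 4) (by omega) (by omega),
        pv_updc m hm, ← pv_skf_eq key m hm,
        pv_lm_setA key n m (by omega)]
    have ec : pvCpost (m + 1) = pvCfi m := by
      unfold pvCpost
      rw [if_neg (by omega)]
      norm_num
    rw [ec]

lemma pv_sched (key : Int) (n : Nat) (hn : 4 ≤ n) :
    pvKeySchedule key (n : Int) = pvLmA key n n := by
  simp only [pvKeySchedule, Int.toNat_natCast]
  rw [pv_init key n hn, pv_fold_sched key n hn n hn le_rfl]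

lemma pv_round_eq (L R K : Int) (hR : 0 ≤ R) (hR2 : R < 65536) :
    (R, PySem.Int.bxor (PySem.Int.bxor L
        (PySem.Int.bxor (PySem.Int.band (pvRol16 R 1) (pvRol16 R 8)) (pvRol16 R 2))) K)
      = pvSimonRound L R K := by
  simp only [pvSimonRound]
  rw [pv_rol_eq hR hR2 1, pv_rol_eq hR hR2 8, pv_rol_eq hR hR2 2]

lemma pv_round_eq6 (L R K w0 w1 w2 w3 : Int) (hR : 0 ≤ R) (hR2 : R < 65536) :
    (R, PySem.Int.bxor (PySem.Int.bxor L
        (PySem.Int.bxor (PySem.Int.band (pvRol16 R 1) (pvRol16 R 8)) (pvRol16 R 2))) K,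
      w0, w1, w2, w3)
      = ((pvSimonRound L R K).1, (pvSimonRound L R K).2, w0, w1, w2, w3) := by
  rw [← pv_round_eq L R K hR hR2]

lemma pv_wnd_le (key : Int) (m : Nat) (hm : m ≤ 4) :
    pvWnd key m = (pvSkf key 0, pvSkf key 1, pvSkf key 2, pvSkf key 3) := by
  unfold pvWnd
  rw [if_pos hm]

lemma pv_round_bounds {L R K : Int} (hL : 0 ≤ L) (hL2 : L < 65536) (hR : 0 ≤ R)
    (hR2 : R < 65536) (hK : 0 ≤ K) (hK2 : K < 65536) :
    (0 ≤ (pvSimonRound L R K).1 ∧ (pvSimonRound L R K).1 < 65536)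
      ∧ (0 ≤ (pvSimonRound L R K).2 ∧ (pvSimonRound L R K).2 < 65536) := by
  simp only [pvSimonRound]
  have s1 := pv_rotl_bounds hR hR2 1
  have s8 := pv_rotl_bounds hR hR2 8
  have s2 := pv_rotl_bounds hR hR2 2
  have hb := pv_band_bounds s1.1 s1.2 s8.1
  have hf := pv_bxor_bounds hb.1 hb.2 s2.1 s2.2
  have h1 := pv_bxor_bounds hL hL2 hf.1 hf.2
  have h2 := pv_bxor_bounds h1.1 h1.2 hK hK2
  exact ⟨⟨hR, hR2⟩, h2⟩

lemma pv_k_eq (key : Int) (m : Nat) (hm : 4 ≤ m) :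
    PySem.Int.bxor (PySem.Int.bxor
        (PySem.Int.bxor (PySem.Int.bxor (pvRor16 (pvSkf key (m - 1)) 3) (pvSkf key (m - 3)))
          (pvSkf key (m - 4)))
        (pvRor16 (PySem.Int.bxor (pvRor16 (pvSkf key (m - 1)) 3) (pvSkf key (m - 3))) 1))
      (if ((m : Nat) : Int) ∈ pvFFFD then (0xfffd : Int) else 0xfffc) = pvSkf key m := by
  have h3 := pv_skf_bounds key (m - 1)
  have h1 := pv_skf_bounds key (m - 3)
  rw [pv_ror_eq h3.1 h3.2 3]
  have hr := pv_rotr_bounds h3.1 h3.2 3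
  have ht := pv_bxor_bounds hr.1 hr.2 h1.1 h1.2
  rw [pv_ror_eq ht.1 ht.2 1]
  rw [show (if ((m : Nat) : Int) ∈ pvFFFD then (0xfffd : Int) else 0xfffc) = pvCfi m from rfl]
  exact (pv_skf_eq key m hm).symm

lemma pv_fuse (key : Int) (n : Nat) (hn : 4 ≤ n) (m : Nat) (hmn : m ≤ n)
    (L R : Int) (hL : 0 ≤ L) (hL2 : L < 65536) (hR : 0 ≤ R) (hR2 : R < 65536) :
    (PySem.List.pyRange 0 (m : Int) 1).foldl pvFuseStep
        (L, R, pvSkf key 0, pvSkf key 1, pvSkf key 2, pvSkf key 3)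
      = (((PySem.List.pyRange 0 (m : Int) 1).foldl
            (fun (p : Int × Int) (i : Int) =>
              pvSimonRound p.1 p.2 ((pvLmA key n n).getD i.toNat 0)) (L, R)).1,
         ((PySem.List.pyRange 0 (m : Int) 1).foldl
            (fun (p : Int × Int) (i : Int) =>
              pvSimonRound p.1 p.2 ((pvLmA key n n).getD i.toNat 0)) (L, R)).2,
         pvWnd key m)
    ∧ (0 ≤ ((PySem.List.pyRange 0 (m : Int) 1).foldl
            (fun (p : Int × Int) (i : Int) =>
              pvSimonRound p.1 p.2 ((pvLmA key n n).getD i.toNat 0)) (L, R)).1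
       ∧ ((PySem.List.pyRange 0 (m : Int) 1).foldl
            (fun (p : Int × Int) (i : Int) =>
              pvSimonRound p.1 p.2 ((pvLmA key n n).getD i.toNat 0)) (L, R)).1 < 65536
       ∧ 0 ≤ ((PySem.List.pyRange 0 (m : Int) 1).foldl
            (fun (p : Int × Int) (i : Int) =>
              pvSimonRound p.1 p.2 ((pvLmA key n n).getD i.toNat 0)) (L, R)).2
       ∧ ((PySem.List.pyRange 0 (m : Int) 1).foldl
            (fun (p : Int × Int) (i : Int) =>
              pvSimonRound p.1 p.2 ((pvLmA key n n).getD i.toNat 0)) (L, R)).2 < 65536) := by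
  revert hmn
  induction m with
  | zero =>
    intro hmn
    rw [show ((0:Nat):Int) = 0 by norm_num, PySem.List.pyRange_one_eq_nil le_rfl]
    simp only [List.foldl_nil]
    refine ⟨?_, hL, hL2, hR, hR2⟩
    simp [pvWnd]
  | succ m ih =>
    intro hmn
    obtain ⟨hEq, hb1, hb2, hb3, hb4⟩ := ih (by omega)
    rw [show ((m+1:Nat):Int) = (m:Int)+1 by push_cast; ring,
        PySem.List.pyRange_one_succ_right (by exact_mod_cast Nat.zero_le m),
        List.foldl_append, List.foldl_append, hEq]
    simp only [List.foldl_cons, List.foldl_nil]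
    rw [show ((m : Nat) : Int).toNat = m from Int.toNat_natCast m,
        pv_lm_get key n n m (by omega) (by omega)]
    have hK := pv_skf_bounds key m
    have hrb := pv_round_bounds hb1 hb2 hb3 hb4 hK.1 hK.2
    refine ⟨?_, hrb.1.1, hrb.1.2, hrb.2.1, hrb.2.2⟩
    by_cases h4 : 4 ≤ m
    · -- window case
      rw [pv_wnd_ge key m h4, pv_wnd_ge key (m+1) (by omega)]
      simp only [pvFuseStep]
      rw [if_neg (by omega), if_neg (by omega), if_neg (by omega), if_neg (by omega)]
      simp only []
      rw [pv_k_eq key m h4]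
      have e4 : m + 1 - 4 = m - 3 := by omega
      have e3 : m + 1 - 3 = m - 2 := by omega
      have e2 : m + 1 - 2 = m - 1 := by omega
      have e1 : m + 1 - 1 = m := by omega
      rw [e4, e3, e2, e1]
      exact pv_round_eq6 _ _ _ _ _ _ _ hb3 hb4
    · rw [pv_wnd_le key m (by omega), pv_wnd_le key (m+1) (by omega)]
      simp only [pvFuseStep]
      interval_cases m
      · rw [if_pos (show ((0:Nat):Int) = 0 by norm_num)]
        exact pv_round_eq6 _ _ _ _ _ _ _ hb3 hb4
      · rw [if_neg (show ¬((1:Nat):Int) = 0 by norm_num),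
            if_pos (show ((1:Nat):Int) = 1 by norm_num)]
        exact pv_round_eq6 _ _ _ _ _ _ _ hb3 hb4
      · rw [if_neg (show ¬((2:Nat):Int) = 0 by norm_num),
            if_neg (show ¬((2:Nat):Int) = 1 by norm_num),
            if_pos (show ((2:Nat):Int) = 2 by norm_num)]
        exact pv_round_eq6 _ _ _ _ _ _ _ hb3 hb4
      · rw [if_neg (show ¬((3:Nat):Int) = 0 by norm_num),
            if_neg (show ¬((3:Nat):Int) = 1 by norm_num),
            if_neg (show ¬((3:Nat):Int) = 2 by norm_num),
            if_pos (show ((3:Nat):Int) = 3 by norm_num)]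
        exact pv_round_eq6 _ _ _ _ _ _ _ hb3 hb4


-- ===== VERDICT (by name: the statement is the Claim_ definition above) =====
theorem simon_encrypt_spec : Claim_equal_simon_encrypt := by
  unfold Claim_equal_simon_encrypt
  intro plaintext key rounds _ hpre
  unfold Spec_simon_encrypt
  unfold Pre_simon_encrypt at hpre
  obtain ⟨n, rfl⟩ : ∃ n : Nat, rounds = (n : Int) := ⟨rounds.toNat, by omega⟩
  have hn : 4 ≤ n := by exact_mod_cast hpre
  have hL := pv_mask_bounds (plaintext >>> 16)
  have hR := pv_mask_bounds plaintext
  have hf := pv_fuse key n hn n le_rfl _ _ hL.1 hL.2 hR.1 hR.2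
  simp only [simon_encrypt, simon_encrypt_alt]
  rw [pv_sched key n hn,
      show PySem.Int.band key 0xffff = pvSkf key 0 from rfl,
      show PySem.Int.band (key >>> 16) 0xffff = pvSkf key 1 from rfl,
      show PySem.Int.band (key >>> 32) 0xffff = pvSkf key 2 from rfl,
      show PySem.Int.band (key >>> 48) 0xffff = pvSkf key 3 from rfl,
      hf.1]
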